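-- pv_equiv track=rewrite | github.com/withaarzoo/GeeksforGeeks-Solution | src/Subset XOR/Code/solution.py | subsetXOR
-- ===== SOURCE A (Python) =====
-- def subsetXOR(n: int):
--     # XOR of 1..n using pattern based on n % 4
--     if n % 4 == 0:
--         T = n
--     elif n % 4 == 1:
--         T = 1
--     elif n % 4 == 2:
--         T = n + 1
--     else:  # n % 4 == 3
--         T = 0
--
--     ans = []
--
--     if T == n:
--         # Case 1: take all numbers 1..n
--         ans = list(range(1, n + 1))
--     else:
--         # Case 2: remove exactly one element x = T ^ n
--         x = T ^ n
--         for i in range(1, n + 1):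
--             if i == x:
--                 continue  # skip x
--             ans.append(i)
--
--     return ans
-- ===== SOURCE B (Python) =====
-- def subsetXOR(n: int):
--     # Running-fold XOR of the range; skipping x = T ^ n unifies both of A's cases,
--     # since when T equals n the skip value vanishes and no element is skipped.
--     T = 0
--     for i in range(1, n + 1):
--         T ^= i
--     x = T ^ n
--     return [i for i in range(1, n + 1) if i != x]
-- ===== Notes on version B (the rewrite author's own statement) =====
-- stated objective: idiomatic
-- what changed: B computes the XOR of the range by a running fold instead of A's modulo-four closed-form table, and replaces A's two branches (take-all vs skip-loop) by a single comprehension that skips x = T ^ n, which vanishes (so nothing is skipped) exactly when A takes all.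
import Mathlib
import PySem

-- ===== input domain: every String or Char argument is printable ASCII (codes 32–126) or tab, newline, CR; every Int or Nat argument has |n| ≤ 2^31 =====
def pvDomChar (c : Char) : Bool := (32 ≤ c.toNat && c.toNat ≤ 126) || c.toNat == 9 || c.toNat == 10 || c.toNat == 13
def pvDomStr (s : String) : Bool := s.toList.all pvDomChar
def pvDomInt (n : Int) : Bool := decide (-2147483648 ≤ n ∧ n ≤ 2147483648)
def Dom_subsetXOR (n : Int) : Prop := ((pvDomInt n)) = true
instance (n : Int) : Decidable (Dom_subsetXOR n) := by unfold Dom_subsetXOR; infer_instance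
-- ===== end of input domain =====

-- B replaces the modulo-four closed form by a running XOR fold over the range and unifies A's two
-- branches into one comprehension that skips x = T ^ n (when T equals n the skip value vanishes, so nothing is skipped).
-- Objective: simpler/idiomatic; exact same return value for every n.

-- ===== PORT A =====
def subsetXOR (n : Int) : List Int :=
  let T : Int :=
    if PySem.Int.mod n 4 = 0 then n
    else if PySem.Int.mod n 4 = 1 then 1
    else if PySem.Int.mod n 4 = 2 then n + 1
    else 0
  let ans : List Int := []
  if T = n then
    PySem.List.pyRange 1 (n + 1) 1
  else
    let x := PySem.Int.bxor T n
    (PySem.List.pyRange 1 (n + 1) 1).foldl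
      (fun ans i => if i = x then ans else ans ++ [i]) ans

-- ===== PORT B =====
def subsetXOR_alt (n : Int) : List Int :=
  let T : Int := (PySem.List.pyRange 1 (n + 1) 1).foldl (fun T i => PySem.Int.bxor T i) 0
  let x := PySem.Int.bxor T n
  (PySem.List.pyRange 1 (n + 1) 1).filter (fun i => i != x)

-- ===== PRECONDITION & SPEC =====
def Spec_subsetXOR (n : Int) (out : List Int) : Prop := out = subsetXOR_alt n
instance (n : Int) (out : List Int) : Decidable (Spec_subsetXOR n out) := by unfold Spec_subsetXOR; infer_instance

-- ===== CLAIM (what is proved, stated in full; the proofs are below) =====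
def Claim_equal_subsetXOR : Prop := ∀ (n : Int), Dom_subsetXOR n → Spec_subsetXOR n (subsetXOR n)

-- ===== LEMMAS AND PROOFS =====

theorem pv_xor_even_succ (j : Nat) : (2*j) ^^^ (2*j+1) = 1 := by
  apply Nat.eq_of_testBit_eq
  intro i
  rw [Nat.testBit_xor]
  cases i with
  | zero => simp [Nat.testBit_zero]
  | succ k =>
    simp only [Nat.testBit_succ]
    have h1 : 2*j/2 = j := by omega
    have h2 : (2*j+1)/2 = j := by omega
    rw [h1, h2]; simp

theorem pv_one_xor_even (j : Nat) : 1 ^^^ (2*j) = 2*j+1 := by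
  apply Nat.eq_of_testBit_eq
  intro i
  rw [Nat.testBit_xor]
  cases i with
  | zero => simp [Nat.testBit_zero]
  | succ k =>
    simp only [Nat.testBit_succ]
    have h2 : (2*j+1)/2 = j := by omega
    have h1 : 2*j/2 = j := by omega
    rw [h1, h2]; simp

-- A's closed form for XOR of 1..n, as a function of n
def pvTclosed (n : Int) : Int :=
  if PySem.Int.mod n 4 = 0 then n
  else if PySem.Int.mod n 4 = 1 then 1
  else if PySem.Int.mod n 4 = 2 then n + 1
  else 0

-- pvTclosed at a value with known residue mod 4
theorem pvT0 (a : Int) (h : PySem.Int.mod a 4 = 0) : pvTclosed a = a := by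
  unfold pvTclosed; rw [if_pos h]
theorem pvT1 (a : Int) (h : PySem.Int.mod a 4 = 1) : pvTclosed a = 1 := by
  unfold pvTclosed; rw [if_neg (by rw [h]; norm_num), if_pos h]
theorem pvT2 (a : Int) (h : PySem.Int.mod a 4 = 2) : pvTclosed a = a + 1 := by
  unfold pvTclosed; rw [if_neg (by rw [h]; norm_num), if_neg (by rw [h]; norm_num), if_pos h]
theorem pvT3 (a : Int) (h : PySem.Int.mod a 4 = 3) : pvTclosed a = 0 := by
  unfold pvTclosed
  rw [if_neg (by rw [h]; norm_num), if_neg (by rw [h]; norm_num), if_neg (by rw [h]; norm_num)]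

theorem pv_mod4 (k r : Nat) (h : k % 4 = r) : PySem.Int.mod (k : Int) 4 = (r : Int) := by
  have hm := PySem.Int.mod_natCast k 4
  push_cast at hm
  rw [hm]; exact_mod_cast congrArg (fun m : Nat => (m : Int)) h

-- the fold over 1..m equals the closed form, for every natural m
theorem pv_fold_eq_closed (m : Nat) :
    (PySem.List.pyRange 1 ((m : Int) + 1) 1).foldl (fun T i => PySem.Int.bxor T i) 0
      = pvTclosed (m : Int) := by
  induction m with
  | zero =>
    simp [pvTclosed, PySem.Int.bxor]
  | succ k ih =>
    have hk : (1 : Int) ≤ (k : Int) + 1 := by omega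
    have hstep : PySem.List.pyRange 1 ((k : Int) + 1 + 1) 1
        = PySem.List.pyRange 1 ((k : Int) + 1) 1 ++ [(k : Int) + 1] :=
      PySem.List.pyRange_one_succ_right hk
    push_cast
    rw [hstep, List.foldl_append, ih]
    simp only [List.foldl_cons, List.foldl_nil]
    have h4 : k % 4 = 0 ∨ k % 4 = 1 ∨ k % 4 = 2 ∨ k % 4 = 3 := by omega
    rcases h4 with h | h | h | h
    · -- k % 4 = 0 : T(k) = k, k even so k ^^^ (k+1) = 1, T(k+1) = 1
      obtain ⟨j, hj⟩ : ∃ j, k = 2*j := ⟨k/2, by omega⟩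
      subst hj
      rw [pvT0 _ (pv_mod4 (2*j) 0 h),
          show ((2*j : Nat) : Int) + 1 = ((2*j+1 : Nat) : Int) by push_cast; ring,
          pvT1 _ (pv_mod4 (2*j+1) 1 (by omega)),
          PySem.Int.bxor_natCast, pv_xor_even_succ]
      norm_num
    · -- k % 4 = 1 : T(k) = 1, k+1 even so 1 ^^^ (k+1) = k+2, T(k+1) = k+2
      obtain ⟨j, hj⟩ : ∃ j, k + 1 = 2*j := ⟨(k+1)/2, by omega⟩
      rw [pvT1 _ (pv_mod4 k 1 h),
          show ((k : Int) + 1) = ((k+1 : Nat) : Int) by push_cast; ring,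
          pvT2 _ (pv_mod4 (k+1) 2 (by omega)), hj,
          show (1 : Int) = ((1 : Nat) : Int) by norm_num,
          PySem.Int.bxor_natCast, pv_one_xor_even]
      push_cast; ring
    · -- k % 4 = 2 : T(k) = k+1, (k+1) ^^^ (k+1) = 0, T(k+1) = 0
      rw [pvT2 _ (pv_mod4 k 2 h),
          show ((k : Int) + 1) = ((k+1 : Nat) : Int) by push_cast; ring,
          pvT3 _ (pv_mod4 (k+1) 3 (by omega)), PySem.Int.bxor_self]
    · -- k % 4 = 3 : T(k) = 0, 0 ^^^ (k+1) = k+1, T(k+1) = k+1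
      rw [pvT3 _ (pv_mod4 k 3 h),
          show ((k : Int) + 1) = ((k+1 : Nat) : Int) by push_cast; ring,
          pvT0 _ (pv_mod4 (k+1) 0 (by omega)),
          PySem.Int.bxor_comm, PySem.Int.bxor_zero]

-- A's skip-loop is a filter
theorem pv_foldl_skip_eq_filter (l : List Int) (x : Int) (acc : List Int) :
    l.foldl (fun ans i => if i = x then ans else ans ++ [i]) acc
      = acc ++ l.filter (fun i => i != x) := by
  induction l generalizing acc with
  | nil => simp
  | cons a t ih =>
    simp only [List.foldl_cons, List.filter_cons]
    by_cases h : a = x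
    · simp [h, ih]
    · simp [h, ih]

-- filtering out 0 from 1..n+1 does nothing
theorem pv_filter_zero (a b : Int) (ha : 1 ≤ a) :
    (PySem.List.pyRange a b 1).filter (fun i => i != (0 : Int)) = PySem.List.pyRange a b 1 := by
  apply List.filter_eq_self.mpr
  intro i hi
  have := (PySem.List.mem_pyRange_one).mp hi
  simp; omega

-- ===== VERDICT (by name: the statement is the Claim_ definition above) =====
theorem subsetXOR_spec : Claim_equal_subsetXOR := by
  intro n _
  unfold Spec_subsetXOR subsetXOR subsetXOR_alt
  by_cases hn : n ≤ 0
  · -- empty range on both sides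
    have h0 : PySem.List.pyRange 1 (n + 1) 1 = [] := PySem.List.pyRange_one_eq_nil (by omega)
    simp [h0]
  · push Not at hn
    obtain ⟨m, hm⟩ : ∃ m : Nat, n = (m : Int) := ⟨n.toNat, by omega⟩
    subst hm
    have hfold := pv_fold_eq_closed m
    rw [hfold]
    by_cases hT : pvTclosed (m : Int) = (m : Int)
    · -- A takes the full range; B's x = T ^ n = 0 removes nothing
      rw [show (if PySem.Int.mod (m:Int) 4 = 0 then (m:Int)
            else if PySem.Int.mod (m:Int) 4 = 1 then 1
            else if PySem.Int.mod (m:Int) 4 = 2 then (m:Int) + 1 else 0) = pvTclosed (m:Int) from rfl]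
      rw [hT]
      simp only [PySem.Int.bxor_self]
      exact (pv_filter_zero 1 ((m:Int)+1) le_rfl).symm
    · rw [show (if PySem.Int.mod (m:Int) 4 = 0 then (m:Int)
            else if PySem.Int.mod (m:Int) 4 = 1 then 1
            else if PySem.Int.mod (m:Int) 4 = 2 then (m:Int) + 1 else 0) = pvTclosed (m:Int) from rfl]
      simp only [if_neg hT]
      exact pv_foldl_skip_eq_filter _ _ []
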